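-- pv_equiv track=rewrite | github.com/Lolja4you/rgr-season-2-episode-1 | rgr_2_my_8.py | weight_Ai
-- ===== SOURCE A (Python) =====
-- def weight_Ai(step):
--     weight_Ai_list = []
--     for i in range(0, step+1):
--         if i == 0 or i == step:
--             weight_Ai_list.append(1)
--         else:
--             weight_Ai_list.append(2)
--     return weight_Ai_list
-- ===== SOURCE B (Python) =====
-- def weight_Ai(step):
--     if step < 0:
--         return []
--     if step == 0:
--         return [1]
--     return [1] + [2] * (step - 1) + [1]
-- ===== Notes on version B (the rewrite author's own statement) =====
-- stated objective: simpler
-- what changed: Replaces A's per-index loop with its endpoint test by an early-return case split on step and a direct three-segment concatenation [1] + [2]*(step-1) + [1], with no loop or index at all.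
import Mathlib
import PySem

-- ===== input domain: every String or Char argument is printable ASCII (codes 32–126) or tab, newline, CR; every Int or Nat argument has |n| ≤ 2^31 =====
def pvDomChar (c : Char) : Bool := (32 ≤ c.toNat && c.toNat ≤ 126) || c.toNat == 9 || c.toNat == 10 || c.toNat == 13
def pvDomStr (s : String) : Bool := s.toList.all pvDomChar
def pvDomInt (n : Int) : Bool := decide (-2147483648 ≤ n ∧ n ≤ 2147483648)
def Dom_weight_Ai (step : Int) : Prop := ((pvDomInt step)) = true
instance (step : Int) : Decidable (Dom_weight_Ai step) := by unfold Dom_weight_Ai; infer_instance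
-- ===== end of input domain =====

-- B replaces A's per-index loop by an early-return case split and a three-segment concatenation [1] + [2]*(step-1) + [1] (objective: simpler).


-- ===== PORT A =====
def weight_Ai (step : Int) : List Int :=
  (PySem.List.pyRange 0 (step + 1) 1).foldl
    (fun acc i => if i == 0 || i == step then acc ++ [1] else acc ++ [2]) []

-- ===== PORT B =====
def weight_Ai_alt (step : Int) : List Int :=
  if step < 0 then []
  else if step = 0 then [1]
  else [1] ++ List.replicate (step - 1).toNat (2 : Int) ++ [1]

-- ===== PRECONDITION & SPEC =====
def Spec_weight_Ai (step : Int) (out : List Int) : Prop := out = weight_Ai_alt step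
instance (step : Int) (out : List Int) : Decidable (Spec_weight_Ai step out) := by unfold Spec_weight_Ai; infer_instance

-- ===== CLAIM (what is proved, stated in full; the proofs are below) =====
def Claim_equal_weight_Ai : Prop := ∀ (step : Int), Dom_weight_Ai step → Spec_weight_Ai step (weight_Ai step)

-- ===== LEMMAS AND PROOFS =====

-- A's loop is a map over range(0, step+1)
theorem weight_Ai_eq_map (step : Int) :
    weight_Ai step =
      (List.range (step + 1).toNat).map
        (fun (k : Nat) => if ((k : Int) == 0 || (k : Int) == step) then (1 : Int) else 2) := by
  unfold weight_Ai
  have h : (PySem.List.pyRange 0 (step + 1) 1).foldl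
      (fun acc i => if i == 0 || i == step then acc ++ [1] else acc ++ [2]) [] =
      (PySem.List.pyRange 0 (step + 1) 1).foldl
      (fun acc i => acc ++ [if i == 0 || i == step then (1 : Int) else 2]) [] := by
    apply PySem.List.foldl_congr_mem
    intro acc x _
    split <;> rfl
  rw [h, PySem.List.foldl_append_singleton_eq_map, PySem.List.pyRange_one, List.map_map]
  simp [Function.comp]

-- the map over range agrees with B's three segments when step ≥ 1
theorem weight_Ai_map_eq_segments (step : Int) (h1 : 1 ≤ step) :
    (List.range (step + 1).toNat).map
        (fun (k : Nat) => if ((k : Int) == 0 || (k : Int) == step) then (1 : Int) else 2) =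
      [1] ++ List.replicate (step - 1).toNat (2 : Int) ++ [1] := by
  apply List.ext_getElem
  · simp; omega
  · intro k hk hk'
    simp only [List.length_map, List.length_range] at hk
    simp only [List.getElem_map, List.getElem_range, List.getElem_append,
      List.getElem_replicate, List.getElem_singleton, List.length_singleton,
      List.length_replicate, List.length_append, beq_iff_eq, Bool.or_eq_true] at hk' ⊢
    split_ifs with hA hB hC <;> first | rfl | omega

theorem weight_Ai_agrees (step : Int) : weight_Ai step = weight_Ai_alt step := by
  unfold weight_Ai_alt
  rw [weight_Ai_eq_map]
  by_cases hneg : step < 0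
  · rw [if_pos hneg]
    have : (step + 1).toNat = 0 := by omega
    simp [this]
  · rw [if_neg hneg]
    by_cases h0 : step = 0
    · subst h0; simp
    · rw [if_neg h0]
      exact weight_Ai_map_eq_segments step (by omega)

-- ===== VERDICT (by name: the statement is the Claim_ definition above) =====
theorem weight_Ai_spec : Claim_equal_weight_Ai := by
  intro step _
  exact weight_Ai_agrees step
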